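-- pv_equiv track=rewrite | github.com/HenryVu27/Suspect-Detection | suspect_detection/retrieval/fts.py | _escape_query
-- ===== SOURCE A (Python) =====
-- def _escape_query(query: str) -> str:
--     # Remove special chars
--     special_chars = ['"', "'", "(", ")", "*", ":", "^", "-"]
--     escaped = query
--     for char in special_chars:
--         escaped = escaped.replace(char, " ")
--
--     # Split into terms
--     terms = [t.strip() for t in escaped.split() if t.strip()]
--     if not terms:
--         return ""
--
--     # Match terms
--     if len(terms) == 1:
--         return terms[0]
--     else:
--         # OR match
--         return " OR ".join(terms)
-- ===== SOURCE B (Python) =====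
-- def _escape_query(query: str) -> str:
--     # One-pass tokenizer: split on runs of whitespace/special chars, join with " OR ".
--     seps = ' \t\n\r\x0b\x0c"\'()*:^-'
--     terms = []
--     cur = []
--     for ch in query:
--         if ch in seps:
--             if cur:
--                 terms.append(''.join(cur))
--                 cur = []
--         else:
--             cur.append(ch)
--     if cur:
--         terms.append(''.join(cur))
--     return ' OR '.join(terms)
-- ===== Notes on version B (the rewrite author's own statement) =====
-- stated objective: alternative
-- what changed: Replaces A's eight whole-string replace passes followed by split/strip/filter and a length branch with a single left-to-right tokenizer that splits on any whitespace-or-special character and joins the collected terms with ' OR ' (the join covers the empty and singleton cases); trades A's multiple C-level string passes for one explicit pass.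
import Mathlib
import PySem

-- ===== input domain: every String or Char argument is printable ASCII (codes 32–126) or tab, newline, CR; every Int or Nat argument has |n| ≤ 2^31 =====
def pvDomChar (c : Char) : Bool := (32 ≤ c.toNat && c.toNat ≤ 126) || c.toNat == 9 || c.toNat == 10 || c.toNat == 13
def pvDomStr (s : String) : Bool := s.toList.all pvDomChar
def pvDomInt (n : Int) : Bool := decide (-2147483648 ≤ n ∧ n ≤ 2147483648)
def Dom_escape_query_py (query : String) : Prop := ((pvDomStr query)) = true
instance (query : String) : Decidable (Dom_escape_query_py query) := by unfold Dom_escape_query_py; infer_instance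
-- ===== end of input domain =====

-- B replaces A's replace-each-special-then-split pipeline by a single-pass tokenizer over the characters (objective: alternative, not faster).

-- ===== PORT A =====
-- Port of A over code points (str.replace with a single-char pattern, str.split(), str.strip, ' OR '.join via PySem.Chars; exact).
def escape_query_py (query : String) : String :=
  let special_chars : List Char := ['"', '\'', '(', ')', '*', ':', '^', '-']
  let escaped : List Char :=
    special_chars.foldl (fun esc ch => PySem.Chars.replace esc [ch] [' ']) query.toList
  let terms : List (List Char) :=
    ((PySem.Chars.split₀ escaped).filter (fun t => !(PySem.Chars.strip t).isEmpty)).map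
      PySem.Chars.strip
  if terms.isEmpty then ""
  else if terms.length == 1 then String.ofList (terms.headD [])
  else String.ofList (PySem.Chars.join " OR ".toList terms)

-- ===== PORT B =====
-- 'ch in seps' of Source B
def pvSep (c : Char) : Bool :=
  decide (c ∈ [' ', '\t', '\n', '\r', '\x0b', '\x0c', '"', '\'', '(', ')', '*', ':', '^', '-'])

-- the for-loop of Source B: cur is the current token (reversed), acc the finished terms (reversed)
def pvTok : List Char → List Char → List (List Char) → List (List Char)
  | [], cur, acc => if cur.isEmpty then acc.reverse else (cur.reverse :: acc).reverse
  | c :: rest, cur, acc =>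
    if pvSep c then
      if cur.isEmpty then pvTok rest [] acc else pvTok rest [] (cur.reverse :: acc)
    else pvTok rest (c :: cur) acc

def escape_query_py_alt (query : String) : String :=
  String.ofList (PySem.Chars.join " OR ".toList (pvTok query.toList [] []))

-- ===== PRECONDITION & SPEC =====
def Spec_escape_query_py (query : String) (out : String) : Prop := out = escape_query_py_alt query
instance (query : String) (out : String) : Decidable (Spec_escape_query_py query out) := by unfold Spec_escape_query_py; infer_instance

-- ===== CLAIM (what is proved, stated in full; the proofs are below) =====
def Claim_equal_escape_query_py : Prop := ∀ (query : String), Dom_escape_query_py query → Spec_escape_query_py query (escape_query_py query)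

-- ===== LEMMAS AND PROOFS =====

-- the substitution A's replace loop performs on each character
def pvSub (c : Char) : Char := if c ∈ ['"', '\'', '(', ')', '*', ':', '^', '-'] then ' ' else c

theorem pv_char_eq_iff (c d : Char) : c = d ↔ c.toNat = d.toNat := by
  rw [Char.ext_iff]; exact UInt32.toNat_inj.symm

theorem pv_replace_go_single (a b : Char) :
    ∀ (l : List Char) (fuel : Nat) (acc : List Char), l.length ≤ fuel →
      PySem.Chars.replace.go [a] [b] fuel l acc
        = acc.reverse ++ l.map (fun c => if c = a then b else c) := by
  intro l
  induction l with
  | nil => intro fuel acc _; cases fuel <;> simp [PySem.Chars.replace.go]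
  | cons c t ih =>
    intro fuel acc h
    cases fuel with
    | zero => simp at h
    | succ f =>
      simp only [PySem.Chars.replace.go]
      by_cases hc : a = c
      · subst hc
        have hp : [a].isPrefixOf (a :: t) = true := by simp [List.isPrefixOf]
        simp only [hp, if_true, List.length_cons, List.length_nil, List.drop_succ_cons,
          List.drop_zero, List.singleton_append, List.reverse_cons, List.reverse_nil,
          List.nil_append]
        rw [ih f (b :: acc) (by simpa using h)]
        simp
      · have hp : [a].isPrefixOf (c :: t) = false := by
          simp [List.isPrefixOf]; exact hc
        simp only [hp, Bool.false_eq_true, if_false]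
        rw [ih f (c :: acc) (by simpa using h)]
        have hne : ¬ (c = a) := fun hh => hc hh.symm
        simp [hne]

theorem pv_replace_single (a b : Char) (s : List Char) :
    PySem.Chars.replace s [a] [b] = s.map (fun c => if c = a then b else c) := by
  simp [PySem.Chars.replace, pv_replace_go_single a b s s.length [] le_rfl]

theorem pv_foldl_replace :
    ∀ (sp : List Char), ' ' ∉ sp → ∀ (cs : List Char),
      sp.foldl (fun esc ch => PySem.Chars.replace esc [ch] [' ']) cs
        = cs.map (fun c => if c ∈ sp then ' ' else c) := by
  intro sp
  induction sp with
  | nil => intro _ cs; simp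
  | cons a rest ih =>
    intro hsp cs
    have h1 : ' ' ∉ rest := fun h => hsp (List.mem_cons_of_mem _ h)
    have h2 : ' ' ≠ a := fun h => hsp (by rw [h]; exact List.mem_cons_self ..)
    rw [List.foldl_cons, pv_replace_single, ih h1, List.map_map]
    refine List.map_congr_left ?_
    intro c _
    by_cases hca : c = a
    · subst hca
      simp [Function.comp, h1, List.mem_cons]
    · simp only [Function.comp, hca, if_false]
      by_cases hm : c ∈ rest <;> simp [List.mem_cons, hca, hm]

theorem pv_esc_eq (cs : List Char) :
    (['"', '\'', '(', ')', '*', ':', '^', '-'] : List Char).foldl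
        (fun esc ch => PySem.Chars.replace esc [ch] [' ']) cs = cs.map pvSub := by
  rw [pv_foldl_replace _ (by decide)]; rfl

theorem pv_key (c : Char) (h : pvDomChar c = true) :
    PySem.Chars.isspace (pvSub c) = pvSep c ∧ (pvSep c = false → pvSub c = c) := by
  by_cases hm : c ∈ ['"', '\'', '(', ')', '*', ':', '^', '-']
  · have hs : pvSub c = ' ' := by simp [pvSub, hm]
    have hsep : pvSep c = true := by
      fin_cases hm <;> decide
    refine ⟨by rw [hs, hsep]; decide, fun hf => by rw [hsep] at hf; cases hf⟩
  · have hs : pvSub c = c := by simp [pvSub, hm]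
    rw [hs]
    refine ⟨?_, fun _ => rfl⟩
    by_cases h32 : c = ' '
    · subst h32; decide
    by_cases h9 : c = '\t'
    · subst h9; decide
    by_cases h10 : c = '\n'
    · subst h10; decide
    by_cases h13 : c = '\x0d'
    · subst h13; decide
    by_cases h11 : c = '\x0b'
    · rw [h11] at h; exact absurd h (by decide)
    by_cases h12 : c = '\x0c'
    · rw [h12] at h; exact absurd h (by decide)
    -- both sides are false
    simp only [List.mem_cons, List.not_mem_nil, or_false, not_or] at hm
    have hsep : pvSep c = false := by
      simp [pvSep, List.mem_cons, h32, h9, h10, h13, h11, h12, hm]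
    rw [hsep]
    -- numeric facts
    simp only [pvDomChar, Bool.or_eq_true, Bool.and_eq_true, decide_eq_true_eq,
      Nat.beq_eq, beq_iff_eq] at h
    have n9 : c.toNat ≠ 9 := fun hh => h9 ((pv_char_eq_iff c '\t').2 (by rw [hh]; decide))
    have n10 : c.toNat ≠ 10 := fun hh => h10 ((pv_char_eq_iff c '\n').2 (by rw [hh]; decide))
    have n13 : c.toNat ≠ 13 := fun hh => h13 ((pv_char_eq_iff c '\x0d').2 (by rw [hh]; decide))
    have n32 : c.toNat ≠ 32 := fun hh => h32 ((pv_char_eq_iff c ' ').2 (by rw [hh]; decide))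
    have n11 : c.toNat ≠ 11 := fun hh => h11 ((pv_char_eq_iff c '\x0b').2 (by rw [hh]; decide))
    have n12 : c.toNat ≠ 12 := fun hh => h12 ((pv_char_eq_iff c '\x0c').2 (by rw [hh]; decide))
    cases hss : PySem.Chars.isspace c with
    | false => rfl
    | true =>
      exfalso
      simp only [PySem.Chars.isspace, Bool.or_eq_true, Bool.and_eq_true,
        decide_eq_true_eq] at hss
      omega

theorem pv_tok_eq :
    ∀ (cs : List Char), cs.all pvDomChar = true → ∀ (cur : List Char) (acc : List (List Char)),
      PySem.Chars.split₀.go (cs.map pvSub) cur acc = pvTok cs cur acc := by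
  intro cs
  induction cs with
  | nil => intro _ cur acc; rfl
  | cons c rest ih =>
    intro h cur acc
    simp only [List.all_cons, Bool.and_eq_true] at h
    obtain ⟨hc, hrest⟩ := h
    obtain ⟨k1, k2⟩ := pv_key c hc
    simp only [List.map_cons, PySem.Chars.split₀.go, pvTok, k1]
    by_cases hsep : pvSep c = true
    · rw [hsep]
      simp only [if_true]
      by_cases hcur : cur.isEmpty
      · simp only [hcur, if_true, ih hrest]
      · simp only [hcur, if_false, ih hrest]
    · have hf : pvSep c = false := by simpa using hsep
      rw [hf]
      simp only [Bool.false_eq_true, if_false, k2 hf, ih hrest]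

def pvGood (t : List Char) : Prop :=
  t ≠ [] ∧ ∀ c ∈ t, pvDomChar c = true ∧ pvSep c = false

theorem pv_tok_good :
    ∀ (cs : List Char), cs.all pvDomChar = true →
    ∀ (cur : List Char) (acc : List (List Char)),
      (∀ c ∈ cur, pvDomChar c = true ∧ pvSep c = false) →
      (∀ t ∈ acc, pvGood t) →
      ∀ t ∈ pvTok cs cur acc, pvGood t := by
  intro cs
  induction cs with
  | nil =>
    intro _ cur acc hcur hacc t ht
    simp only [pvTok] at ht
    by_cases hc : cur.isEmpty
    · rw [if_pos hc, List.mem_reverse] at ht; exact hacc t ht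
    · rw [if_neg hc, List.mem_reverse, List.mem_cons] at ht
      rcases ht with rfl | ht
      · refine ⟨?_, fun c hcmem => hcur c (List.mem_reverse.1 hcmem)⟩
        intro hnil
        exact hc (by simpa [List.isEmpty_iff] using List.reverse_eq_nil_iff.1 hnil)
      · exact hacc t ht
  | cons c rest ih =>
    intro h cur acc hcur hacc
    simp only [List.all_cons, Bool.and_eq_true] at h
    obtain ⟨hc, hrest⟩ := h
    simp only [pvTok]
    by_cases hsep : pvSep c = true
    · rw [if_pos hsep]
      by_cases hce : cur.isEmpty
      · rw [if_pos hce]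
        exact ih hrest [] acc (by simp) hacc
      · rw [if_neg hce]
        refine ih hrest [] _ (by simp) ?_
        intro t ht
        rcases List.mem_cons.1 ht with rfl | ht
        · refine ⟨?_, fun d hd => hcur d (List.mem_reverse.1 hd)⟩
          intro hnil
          exact hce (by simpa [List.isEmpty_iff] using List.reverse_eq_nil_iff.1 hnil)
        · exact hacc t ht
    · rw [if_neg hsep]
      refine ih hrest (c :: cur) acc ?_ hacc
      intro d hd
      rcases List.mem_cons.1 hd with rfl | hd
      · exact ⟨hc, by simpa using hsep⟩
      · exact hcur d hd

theorem pv_dropWhile_id (l : List Char)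
    (h : ∀ c ∈ l, PySem.Chars.isspace c = false) :
    List.dropWhile PySem.Chars.isspace l = l := by
  cases l with
  | nil => rfl
  | cons a as => simp [List.dropWhile_cons, h a (List.mem_cons_self ..)]

theorem pv_strip_id (t : List Char) (h : ∀ c ∈ t, PySem.Chars.isspace c = false) :
    PySem.Chars.strip t = t := by
  unfold PySem.Chars.strip PySem.Chars.lstrip PySem.Chars.rstrip
  rw [pv_dropWhile_id t h, pv_dropWhile_id t.reverse (fun c hc => h c (List.mem_reverse.1 hc)),
    List.reverse_reverse]

theorem pv_good_no_space (t : List Char) (hgood : pvGood t) :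
    ∀ c ∈ t, PySem.Chars.isspace c = false := by
  intro c hc
  obtain ⟨hdom, hsep⟩ := hgood.2 c hc
  obtain ⟨k1, k2⟩ := pv_key c hdom
  rw [← k2 hsep, k1]
  exact hsep

theorem pv_filt (ts : List (List Char)) (h : ∀ t ∈ ts, pvGood t) :
    (ts.filter (fun t => !(PySem.Chars.strip t).isEmpty)).map PySem.Chars.strip = ts := by
  induction ts with
  | nil => rfl
  | cons t rest ih =>
    have hg := h t (List.mem_cons_self ..)
    have hst : PySem.Chars.strip t = t := pv_strip_id t (pv_good_no_space t hg)
    have hne : t.isEmpty = false := by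
      cases t with
      | nil => exact absurd rfl hg.1
      | cons a as => rfl
    rw [List.filter_cons]
    simp only [hst, hne, Bool.not_false, if_true, List.map_cons]
    rw [ih (fun u hu => h u (List.mem_cons_of_mem _ hu))]

-- ===== VERDICT (by name: the statement is the Claim_ definition above) =====
theorem escape_query_py_spec : Claim_equal_escape_query_py := by
  intro query hdom
  unfold Spec_escape_query_py
  have hall : query.toList.all pvDomChar = true := hdom
  unfold escape_query_py escape_query_py_alt
  simp only [pv_esc_eq]
  rw [show PySem.Chars.split₀ (query.toList.map pvSub)
        = PySem.Chars.split₀.go (query.toList.map pvSub) [] [] from rfl,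
    pv_tok_eq query.toList hall [] []]
  have hgood : ∀ t ∈ pvTok query.toList [] [], pvGood t :=
    pv_tok_good query.toList hall [] [] (by simp) (by simp)
  rw [pv_filt _ hgood]
  cases hts : pvTok query.toList [] [] with
  | nil => simp [PySem.Chars.join_nil]
  | cons t1 tr =>
    cases tr with
    | nil =>
      simp only [List.isEmpty_cons, Bool.false_eq_true, if_false, List.length_cons,
        List.length_nil, Nat.zero_add, beq_self_eq_true, if_true, List.headD_cons,
        PySem.Chars.join_singleton]
    | cons t2 ts =>
      have hlen : ((t1 :: t2 :: ts).length == 1) = false := by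
        simp [List.length_cons]
      simp only [List.isEmpty_cons, Bool.false_eq_true, if_false, hlen]
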